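-- pv_equiv track=rewrite | github.com/mathbeveridge/asm | stackset/build_stack_set.py | stack_to_kagog
-- ===== SOURCE A (Python) =====
-- def stack_to_kagog(stack):
--     kagog = []
--     for row in stack:
--         krow = []
--         for idx in range(len(row)):
--             if row[idx] == 1:
--                 krow.append(idx+1)
--             else:
--                 krow.insert(0,0)
--         kagog.append(krow)
--     return kagog
-- ===== SOURCE B (Python) =====
-- def stack_to_kagog(stack):
--     return [[0] * sum(1 for v in row if v != 1)
--             + [i + 1 for i, v in enumerate(row) if v == 1]
--             for row in stack]
-- ===== Notes on version B (the rewrite author's own statement) =====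
-- stated objective: faster
-- what changed: Per row, instead of building the result element by element with quadratic insert(0,0) front-insertions, B counts the non-1 entries and concatenates that many zeros with the 1-positions collected by enumerate in one linear comprehension.
import Mathlib
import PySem

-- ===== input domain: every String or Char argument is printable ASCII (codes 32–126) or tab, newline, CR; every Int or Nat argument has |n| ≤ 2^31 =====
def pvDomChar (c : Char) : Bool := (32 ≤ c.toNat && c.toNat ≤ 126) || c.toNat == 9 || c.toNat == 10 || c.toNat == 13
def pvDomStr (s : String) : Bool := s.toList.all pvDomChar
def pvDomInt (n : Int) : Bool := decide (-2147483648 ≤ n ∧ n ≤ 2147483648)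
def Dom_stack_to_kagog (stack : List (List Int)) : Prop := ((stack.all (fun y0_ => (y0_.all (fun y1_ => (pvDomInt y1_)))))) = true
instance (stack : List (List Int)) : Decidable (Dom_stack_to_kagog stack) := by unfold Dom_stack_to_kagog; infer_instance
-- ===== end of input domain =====

-- B replaces A's per-row loop with its quadratic insert(0,0) front-insertions by a linear
-- count of non-1 entries plus an enumerate comprehension over the 1-positions (objective: faster).

-- ===== PORT A =====
-- inner loop: for idx in range(len(row)): append idx+1 if row[idx]==1 else insert(0,0)
def stack_to_kagog_row (row : List Int) : List Int :=
  (PySem.List.pyRange 0 (row.length : Int) 1).foldl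
    (fun krow idx =>
      if PySem.List.pyGetD row idx 0 = 1 then krow ++ [idx + 1]
      else PySem.List.insert krow 0 0) []

def stack_to_kagog (stack : List (List Int)) : List (List Int) :=
  stack.foldl (fun kagog row => kagog ++ [stack_to_kagog_row row]) []

-- ===== PORT B =====
def stack_to_kagog_alt (stack : List (List Int)) : List (List Int) :=
  stack.map (fun row =>
    List.replicate (row.countP (fun v => v ≠ 1)) 0 ++
      ((PySem.List.enumerate row 0).filter (fun p => p.2 = 1)).map (fun p => p.1 + 1))

-- ===== PRECONDITION & SPEC =====
def Spec_stack_to_kagog (stack : List (List Int)) (out : List (List Int)) : Prop := out = stack_to_kagog_alt stack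
instance (stack : List (List Int)) (out : List (List Int)) : Decidable (Spec_stack_to_kagog stack out) := by unfold Spec_stack_to_kagog; infer_instance

-- ===== CLAIM (what is proved, stated in full; the proofs are below) =====
def Claim_equal_stack_to_kagog : Prop := ∀ (stack : List (List Int)), Dom_stack_to_kagog stack → Spec_stack_to_kagog stack (stack_to_kagog stack)

-- ===== LEMMAS AND PROOFS =====

-- A's inner loop over the suffix `rest` of the row, with `pre` already consumed and krow = acc:
-- zeros from `rest` end up in front, acc stays in the middle, the 1-positions of `rest` follow.
lemma row_loop_spec (rest : List Int) : ∀ (pre acc : List Int),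
    (PySem.List.pyRange (pre.length : Int) ((pre ++ rest).length : Int) 1).foldl
      (fun krow idx =>
        if PySem.List.pyGetD (pre ++ rest) idx 0 = 1 then krow ++ [idx + 1]
        else PySem.List.insert krow 0 0) acc
    = List.replicate (rest.countP (fun v => v ≠ 1)) 0 ++ acc ++
        ((PySem.List.enumerate rest (pre.length : Int)).filter (fun p => p.2 = 1)).map
          (fun p => p.1 + 1) := by
  induction rest with
  | nil => simp [PySem.List.pyRange_one_eq_nil, PySem.List.enumerate_nil]
  | cons v rest ih =>
    intro pre acc
    have hlt : (pre.length : Int) < ((pre ++ v :: rest).length : Int) := by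
      simp
    rw [PySem.List.pyRange_one_cons hlt]
    have hget : PySem.List.pyGetD (pre ++ v :: rest) (pre.length : Int) 0 = v := by
      rw [PySem.List.pyGetD_natCast]
      simp
    have hshift : pre ++ v :: rest = (pre ++ [v]) ++ rest := by simp
    have hlen : (pre.length : Int) + 1 = ((pre ++ [v]).length : Int) := by simp
    simp only [List.foldl_cons, hget]
    by_cases hv : v = 1
    · rw [if_pos hv, hshift, hlen, ih]
      subst hv
      simp [List.append_assoc]
    · rw [if_neg hv, PySem.List.insert_zero, hshift, hlen, ih]
      simp [hv, List.replicate_succ']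

theorem stack_to_kagog_spec : Claim_equal_stack_to_kagog := by
  intro stack _
  unfold Spec_stack_to_kagog stack_to_kagog stack_to_kagog_alt
  rw [PySem.List.foldl_append_singleton_eq_map]
  refine List.map_congr_left (fun row _ => ?_)
  have h := row_loop_spec row [] []
  simpa [stack_to_kagog_row] using h
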